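-- pv_equiv track=rewrite | github.com/am17an/ProjectEuler | 688.py | calculate_T_even_N
-- ===== SOURCE A (Python) =====
-- mod = int(1e9) + 7
--
-- def sum_integers(a: int, b: int) -> int:
--     """
--     Calculates the sum of integers from a to b (inclusive).
--     Sum = a + (a+1) + ... + b
--     Uses the formula: Sum(1..b) - Sum(1..a-1)
--     """
--     if a > b:
--         return 0
--     # Calculate sum from 1 to b
--     sum_b = (b * (b + 1)) // 2
--     # Calculate sum from 1 to a-1
--     sum_a_minus_1 = ((a - 1) * a) // 2
--     # The result is the difference
--     return int(sum_b - sum_a_minus_1)%mod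
--
-- def calculate_T_even_N(N: int) -> int:
--     """
--     Calculates T_even(N) = sum_{j=1}^{floor(N/2)} j * floor(N/2j)*(floor(N/2j)+1).
--     This is derived from Sum_{k even} k * floor(N/k)*(floor(N/k)+1)/2.
--     Uses block summation based on value v = floor(N/(2j)). Runs in O(sqrt(N)).
--     """
--     if N <= 1: # floor(N/2) is 0, so sum is empty
--         return 0
--
--     M = N // 2 # Upper limit for j
--     T_even = 0
--     j = 1
--     while j <= M:
--         # Value in floor: v = floor(N / (2j))
--         if N < 2 * j: # Avoid potential issues, means v=0
--              break
--         v = N // (2 * j)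
--         if v == 0: # Means 2j > N
--             break
--
--         # Find last j in block: j_last = floor(N / (2v))
--         # Also, j_last cannot exceed M = floor(N/2)
--         # Check for v=0 already done above, so 2v is safe if N>=1
--         j_last_candidate = N // (2 * v)
--         j_last = min(j_last_candidate, M)
--
--         # Sum of j in the current block [j, j_last]
--         sum_of_j = sum_integers(j, j_last)
--
--         # Contribution for this block is v * (v + 1) * sum_of_j
--         T_even += v * (v + 1) * sum_of_j
--
--         T_even %= mod
--
--         # Move j to the start of the next block
--         j = j_last + 1
--
--     return T_even
-- ===== SOURCE B (Python) =====
-- mod = int(1e9) + 7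
--
-- def calculate_T_even_N(N: int) -> int:
--     """
--     Same T_even(N) = sum_{j=1}^{M} j*q*(q+1), q = M//j, M = N//2 (N//(2j) == (N//2)//j),
--     computed by sqrt decomposition: a direct loop for j up to sqrt(M), then one loop over
--     the quotient values v, summing each contiguous block of j's with M//j == v in closed
--     form via Gauss sums; a single mod at the end.
--     """
--     M = N // 2
--     T = 0
--     j = 1
--     while j * j <= M:
--         q = M // j
--         T += j * q * (q + 1)
--         j += 1
--     s = j - 1
--     for v in range(1, s + 1):
--         hi = M // v
--         lo = max(s, M // (v + 1))
--         if hi > lo: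
--             T += v * (v + 1) * ((hi * (hi + 1) - lo * (lo + 1)) // 2)
--     return T % mod
-- ===== Notes on version B (the rewrite author's own statement) =====
-- stated objective: alternative
-- what changed: Replaced A's block-jumping while loop over j (computing each block's extent from v = N//(2j) and a Gauss-sum helper, with a mod after every block) by a sqrt decomposition over M = N//2: a plain loop adds the terms for j up to sqrt(M), then a for-loop over the quotient values v closes each remaining block with an inline Gauss sum, and the result is reduced mod 1e9+7 once at the end.
import Mathlib
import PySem

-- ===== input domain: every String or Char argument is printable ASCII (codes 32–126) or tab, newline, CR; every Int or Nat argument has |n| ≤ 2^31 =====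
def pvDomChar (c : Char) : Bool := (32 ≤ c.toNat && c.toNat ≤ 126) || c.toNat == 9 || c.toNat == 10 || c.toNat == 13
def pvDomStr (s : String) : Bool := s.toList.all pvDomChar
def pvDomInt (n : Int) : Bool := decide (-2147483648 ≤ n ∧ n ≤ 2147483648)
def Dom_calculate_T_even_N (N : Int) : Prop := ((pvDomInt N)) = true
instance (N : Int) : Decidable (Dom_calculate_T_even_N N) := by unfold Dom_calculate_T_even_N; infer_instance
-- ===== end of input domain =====

-- B computes the same sum by sqrt decomposition over M = N//2 (direct loop up to sqrt(M),
-- then one loop over quotient values with Gauss-sum blocks) instead of A's block-jumping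
-- while loop over j (objective: alternative algorithm of the same asymptotic cost).

-- ===== PORT A =====
def sum_integers (a b : Int) : Int :=
  if a > b then 0
  else
    -- sum_b = (b*(b+1))//2 ; sum_a_minus_1 = ((a-1)*a)//2 ; return (sum_b - sum_a_minus_1) % mod
    PySem.Int.mod (PySem.Int.floordiv (b * (b + 1)) 2 - PySem.Int.floordiv ((a - 1) * a) 2) 1000000007

-- the while-loop of A; fuel only makes the recursion total (initial fuel always suffices: j strictly increases)
def calcLoopA (N M : Int) : Nat → Int → Int → Int
  | 0, T_even, _ => T_even
  | fuel + 1, T_even, j =>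
    if j ≤ M then
      if N < 2 * j then T_even
      else
        let v := PySem.Int.floordiv N (2 * j)
        if v = 0 then T_even
        else
          let j_last := min (PySem.Int.floordiv N (2 * v)) M
          calcLoopA N M fuel
            (PySem.Int.mod (T_even + v * (v + 1) * sum_integers j j_last) 1000000007)
            (j_last + 1)
    else T_even

def calculate_T_even_N (N : Int) : Int :=
  if N ≤ 1 then 0
  else calcLoopA N (PySem.Int.floordiv N 2) (N.toNat + 1) 0 1

-- ===== PORT B =====
-- the `while j * j <= M` loop of B; returns (T, j); fuel only makes the recursion total
def altSqrtLoop (M : Int) : Nat → Int → Int → Int × Int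
  | 0, T, j => (T, j)
  | fuel + 1, T, j =>
    if j * j ≤ M then
      altSqrtLoop M fuel (T + j * PySem.Int.floordiv M j * (PySem.Int.floordiv M j + 1)) (j + 1)
    else (T, j)

def calculate_T_even_N_alt (N : Int) : Int :=
  let M := PySem.Int.floordiv N 2
  let p := altSqrtLoop M (M.toNat + 1) 0 1
  let s := p.2 - 1
  let T2 := (PySem.List.pyRange 1 (s + 1) 1).foldl
    (fun T v =>
      let hi := PySem.Int.floordiv M v
      let lo := max s (PySem.Int.floordiv M (v + 1))
      if lo < hi then T + v * (v + 1) * PySem.Int.floordiv (hi * (hi + 1) - lo * (lo + 1)) 2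
      else T) p.1
  PySem.Int.mod T2 1000000007

-- ===== PRECONDITION & SPEC =====
def Spec_calculate_T_even_N (N : Int) (out : Int) : Prop := out = calculate_T_even_N_alt N
instance (N : Int) (out : Int) : Decidable (Spec_calculate_T_even_N N out) := by unfold Spec_calculate_T_even_N; infer_instance

-- ===== CLAIM (what is proved, stated in full; the proofs are below) =====
def Claim_equal_calculate_T_even_N : Prop := ∀ (N : Int), Dom_calculate_T_even_N N → Spec_calculate_T_even_N N (calculate_T_even_N N)

-- ===== LEMMAS AND PROOFS =====

-- the j-th term of the sum written as A computes it: j * (N // (2j)) * (N // (2j) + 1)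
def pvTerm (N j : Int) : Int :=
  j * PySem.Int.floordiv N (2 * j) * (PySem.Int.floordiv N (2 * j) + 1)

-- the same term written as B computes it, with M = N // 2: j * (M // j) * (M // j + 1)
def pvTermM (M j : Int) : Int := j * (M / j) * (M / j + 1)

-- Gauss: sum of the integers a..b equals b(b+1)/2 - (a-1)a/2
theorem pv_gauss : ∀ (n : Nat) (a b : Int), b + 1 - a = (n : Int) →
    (PySem.List.pyRange a (b + 1) 1).sum = b * (b + 1) / 2 - (a - 1) * a / 2 := by
  intro n
  induction n with
  | zero =>
    intro a b h
    rw [PySem.List.pyRange_one_eq_nil (by omega)]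
    have : a = b + 1 := by omega
    subst this
    simp
  | succ k ih =>
    intro a b h
    have hn : b + 1 - a = (k : Int) + 1 := by exact_mod_cast h
    rw [PySem.List.pyRange_one_cons (by omega), List.sum_cons, ih (a + 1) b (by omega)]
    have hpq : a * (a + 1) = (a - 1) * a + 2 * a := by ring
    have hp : a * (a + 1) % 2 = 0 := by
      have he := Int.even_mul_succ_self a
      rwa [Int.even_iff] at he
    have hq : (a - 1) * a % 2 = 0 := by
      have he := Int.even_mul_succ_self (a - 1)
      rw [Int.even_iff, show (a - 1) * (a - 1 + 1) = (a - 1) * a from by ring] at he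
      exact he
    have : (a + 1 - 1) * (a + 1) = a * (a + 1) := by ring
    rw [this]
    omega

-- on a block [j, j_last] the quotient N // (2x) is constantly v
theorem pv_const_on_block (N v j j_last : Int) (hj : 1 ≤ j) (_hN : 0 ≤ N)
    (hv : v = N / (2 * j)) (hvpos : 1 ≤ v) (hlast : j_last ≤ N / (2 * v)) :
    ∀ x, j ≤ x → x ≤ j_last → N / (2 * x) = v := by
  intro x hx1 hx2
  have hxpos : 0 < 2 * x := by omega
  have hjpos : 0 < 2 * j := by omega
  have hvpos2 : 0 < 2 * v := by omega
  have h1 : v ≤ N / (2 * x) := by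
    rw [Int.le_ediv_iff_mul_le hxpos]
    have : x * (2 * v) ≤ N := by
      have := (Int.le_ediv_iff_mul_le hvpos2).mp (le_trans hx2 hlast)
      linarith
    linarith
  have h2 : N / (2 * x) < v + 1 := by
    rw [Int.ediv_lt_iff_lt_mul hxpos]
    have hlt : N < (v + 1) * (2 * j) := by
      have := Int.lt_ediv_add_one_mul_self N hjpos
      rw [← hv] at this; exact this
    have : (v + 1) * (2 * j) ≤ (v + 1) * (2 * x) := by nlinarith
    linarith
  omega

-- correctness of A's block loop: it computes (T + Σ_{x=j}^{M} pvTerm N x) % mod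
theorem pv_loopA (N M : Int) (_hN : 2 ≤ N) (hM : M = PySem.Int.floordiv N 2) :
    ∀ (fuel : Nat) (T j : Int), 1 ≤ j → 0 ≤ T → T < 1000000007 →
      (M + 1 - j).toNat ≤ fuel →
      calcLoopA N M fuel T j = (T + ((PySem.List.pyRange j (M + 1) 1).map (pvTerm N)).sum) % 1000000007 := by
  have hM2 : M = N / 2 := by rw [hM, PySem.Int.floordiv_eq_ediv_of_pos (by omega)]
  intro fuel
  induction fuel with
  | zero =>
    intro T j hj h0 h1 hfuel
    have : M + 1 ≤ j := by omega
    rw [calcLoopA, PySem.List.pyRange_one_eq_nil this]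
    simpa using (Int.emod_eq_of_lt h0 h1).symm
  | succ k ih =>
    intro T j hj h0 h1 hfuel
    rw [calcLoopA]
    by_cases hjM : j ≤ M
    · simp only [if_pos hjM]
      have hjpos : 0 < 2 * j := by omega
      have h2jN : 2 * j ≤ N := by
        have h1 : 2 * (N / 2) ≤ N := by omega
        omega
      rw [if_neg (by omega)]
      set v := PySem.Int.floordiv N (2 * j) with hvdef
      have hv : v = N / (2 * j) := by rw [hvdef, PySem.Int.floordiv_eq_ediv_of_pos hjpos]
      have hvpos : 1 ≤ v := by
        rw [hv, Int.le_ediv_iff_mul_le hjpos]; omega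
      rw [if_neg (by omega)]
      have hvpos2 : 0 < 2 * v := by omega
      set jl := min (PySem.Int.floordiv N (2 * v)) M with hjldef
      have hjl2 : jl = min (N / (2 * v)) M := by
        rw [hjldef, PySem.Int.floordiv_eq_ediv_of_pos hvpos2]
      have hjjl : j ≤ jl := by
        have : j ≤ N / (2 * v) := by
          rw [Int.le_ediv_iff_mul_le hvpos2]
          have := Int.ediv_mul_le N (show (2 : Int) * j ≠ 0 by omega)
          rw [← hv] at this; linarith
        omega
      have hjlM : jl ≤ M := by omega
      have hconst : ∀ x, j ≤ x → x ≤ jl → N / (2 * x) = v :=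
        pv_const_on_block N v j jl hj (by omega) hv hvpos
          (by rw [hjl2]; exact min_le_left _ _)
      -- split the range at jl + 1
      rw [PySem.List.pyRange_one_append j (jl + 1) (M + 1) (by omega) (by omega),
          List.map_append, List.sum_append]
      -- the first block's terms are all x * v * (v+1)
      have hblock : ((PySem.List.pyRange j (jl + 1) 1).map (pvTerm N)).sum
          = (PySem.List.pyRange j (jl + 1) 1).sum * (v * (v + 1)) := by
        rw [show ((PySem.List.pyRange j (jl + 1) 1).map (pvTerm N))
              = (PySem.List.pyRange j (jl + 1) 1).map (fun x => x * (v * (v + 1))) from ?_]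
        · exact List.sum_map_mul_right _ id _ |>.trans (by rw [List.map_id])
        · apply List.map_congr_left
          intro x hx
          rw [PySem.List.mem_pyRange_one] at hx
          have hxv : N / (2 * x) = v := hconst x hx.1 (by omega)
          unfold pvTerm
          rw [PySem.Int.floordiv_eq_ediv_of_pos (by omega), hxv]; ring
      -- sum_integers j jl equals the block's integer sum, mod p
      have hG : (PySem.List.pyRange j (jl + 1) 1).sum = jl * (jl + 1) / 2 - (j - 1) * j / 2 :=
        pv_gauss (jl + 1 - j).toNat j jl (by omega)
      have hsi : sum_integers j jl = (PySem.List.pyRange j (jl + 1) 1).sum % 1000000007 := by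
        unfold sum_integers
        rw [if_neg (by omega), PySem.Int.mod_eq_emod_of_pos (by omega),
            PySem.Int.floordiv_eq_ediv_of_pos (by omega),
            PySem.Int.floordiv_eq_ediv_of_pos (by omega), hG]
      -- apply the IH at (T', jl+1) and recombine the mods
      rw [PySem.Int.mod_eq_emod_of_pos (show (0:Int) < 1000000007 by omega),
          ih _ (jl + 1) (by omega)
            (Int.emod_nonneg _ (by omega)) (Int.emod_lt_of_pos _ (by omega)) (by omega),
          Int.emod_add_emod]
      have hmodeq : T + v * (v + 1) * sum_integers j jl
            + ((PySem.List.pyRange (jl + 1) (M + 1) 1).map (pvTerm N)).sum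
          ≡ T + (((PySem.List.pyRange j (jl + 1) 1).map (pvTerm N)).sum
            + ((PySem.List.pyRange (jl + 1) (M + 1) 1).map (pvTerm N)).sum) [ZMOD 1000000007] := by
        have hb : v * (v + 1) * sum_integers j jl
            ≡ ((PySem.List.pyRange j (jl + 1) 1).map (pvTerm N)).sum [ZMOD 1000000007] := by
          rw [hsi, hblock]
          calc v * (v + 1) * ((PySem.List.pyRange j (jl + 1) 1).sum % 1000000007)
              ≡ v * (v + 1) * (PySem.List.pyRange j (jl + 1) 1).sum [ZMOD 1000000007] :=
                Int.ModEq.mul_left _ (Int.emod_emod_of_dvd _ dvd_rfl)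
            _ = (PySem.List.pyRange j (jl + 1) 1).sum * (v * (v + 1)) := by ring
        calc T + v * (v + 1) * sum_integers j jl
              + ((PySem.List.pyRange (jl + 1) (M + 1) 1).map (pvTerm N)).sum
            ≡ T + ((PySem.List.pyRange j (jl + 1) 1).map (pvTerm N)).sum
              + ((PySem.List.pyRange (jl + 1) (M + 1) 1).map (pvTerm N)).sum [ZMOD 1000000007] :=
              Int.ModEq.add_right _ (Int.ModEq.add_left _ hb)
          _ = T + (((PySem.List.pyRange j (jl + 1) 1).map (pvTerm N)).sum
              + ((PySem.List.pyRange (jl + 1) (M + 1) 1).map (pvTerm N)).sum) := by ring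
      exact hmodeq
    · rw [if_neg hjM, PySem.List.pyRange_one_eq_nil (by omega)]
      simpa using (Int.emod_eq_of_lt h0 h1).symm

-- B's sqrt loop accumulates the terms for j = 1..s and stops with j = s + 1
theorem pv_sqrtLoop (M s : Int) (hs1 : s * s ≤ M) (hs2 : M < (s + 1) * (s + 1)) :
    ∀ (fuel : Nat) (T j : Int), 1 ≤ j → j ≤ s + 1 → (s + 1 - j).toNat ≤ fuel →
      altSqrtLoop M fuel T j = (T + ((PySem.List.pyRange j (s + 1) 1).map (pvTermM M)).sum, s + 1) := by
  intro fuel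
  induction fuel with
  | zero =>
    intro T j hj hjs hfuel
    have hjeq : j = s + 1 := by omega
    rw [altSqrtLoop, PySem.List.pyRange_one_eq_nil (by omega)]
    simp [hjeq]
  | succ k ih =>
    intro T j hj hjs hfuel
    rw [altSqrtLoop]
    by_cases hcond : j * j ≤ M
    · have hjle : j ≤ s := by
        by_contra hgt
        have hjeq : j = s + 1 := by omega
        subst hjeq
        omega
      rw [if_pos hcond, ih _ (j + 1) (by omega) (by omega) (by omega),
          show PySem.List.pyRange j (s + 1) 1 = j :: PySem.List.pyRange (j + 1) (s + 1) 1 from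
            PySem.List.pyRange_one_cons (by omega),
          List.map_cons, List.sum_cons]
      have hterm : j * PySem.Int.floordiv M j * (PySem.Int.floordiv M j + 1) = pvTermM M j := by
        unfold pvTermM
        rw [PySem.Int.floordiv_eq_ediv_of_pos (by omega)]
      rw [hterm]
      exact congrArg (·, s + 1) (by ring)
    · have hjeq : j = s + 1 := by
        by_contra hne
        have hjle : j ≤ s := by omega
        have : j * j ≤ s * s := by nlinarith
        omega
      rw [if_neg hcond, PySem.List.pyRange_one_eq_nil (by omega)]
      simp [hjeq]

-- the quotients M // v are antitone in v (for M ≥ 0, 0 < v)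
theorem pv_ediv_anti (M v w : Int) (hM : 0 ≤ M) (hv : 0 < v) (hvw : v ≤ w) : M / w ≤ M / v := by
  have hw : 0 < w := by omega
  rw [Int.le_ediv_iff_mul_le hv]
  have h1 : M / w * w ≤ M := by
    have := Int.ediv_mul_le M (show w ≠ 0 by omega)
    linarith
  have h0 : 0 ≤ M / w := Int.ediv_nonneg hM (by omega)
  nlinarith

-- B's second loop: after processing v = 1..w the accumulator holds T0 plus the terms for
-- j in (max s (M // (w+1)), M]
theorem pv_vLoop (M s : Int) (hs1 : s * s ≤ M) (_hs2 : M < (s + 1) * (s + 1)) (hs0 : 1 ≤ s) :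
    ∀ (n : Nat) (T0 : Int), (n : Int) ≤ s →
      (PySem.List.pyRange 1 ((n : Int) + 1) 1).foldl
        (fun T v =>
          let hi := PySem.Int.floordiv M v
          let lo := max s (PySem.Int.floordiv M (v + 1))
          if lo < hi then T + v * (v + 1) * PySem.Int.floordiv (hi * (hi + 1) - lo * (lo + 1)) 2
          else T) T0
      = T0 + ((PySem.List.pyRange (max s (M / ((n : Int) + 1)) + 1) (M + 1) 1).map (pvTermM M)).sum := by
  have hsM : s ≤ M := by nlinarith
  have hM0 : 0 ≤ M := by omega
  intro n
  induction n with
  | zero =>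
    intro T0 _
    simp only [Nat.cast_zero, zero_add]
    rw [PySem.List.pyRange_one_eq_nil (le_refl 1), Int.ediv_one, max_eq_right hsM,
        PySem.List.pyRange_one_eq_nil (by omega)]
    simp
  | succ k ih =>
    intro T0 hks
    have hk1 : ((k : Int) + 1) ≤ s := by exact_mod_cast hks
    have hcast : ((k + 1 : Nat) : Int) = (k : Int) + 1 := by push_cast; ring
    rw [hcast, show (k : Int) + 1 + 1 = ((k : Int) + 1) + 1 from rfl,
        PySem.List.pyRange_one_succ_right (by omega), List.foldl_append, ih T0 (by omega)]
    set v : Int := (k : Int) + 1 with hvdef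
    have hv0 : 0 < v := by omega
    have hanti : M / (v + 1) ≤ M / v := pv_ediv_anti M v (v + 1) hM0 hv0 (by omega)
    simp only [List.foldl_cons, List.foldl_nil]
    rw [PySem.Int.floordiv_eq_ediv_of_pos hv0, PySem.Int.floordiv_eq_ediv_of_pos (by omega)]
    by_cases hblk : max s (M / (v + 1)) < M / v
    · rw [if_pos hblk]
      set lo := max s (M / (v + 1)) with hlodef
      set hi := M / v with hhidef
      have hlos : s ≤ lo := le_max_left _ _
      have hhiM : hi ≤ M := Int.ediv_le_self v hM0
      have hmaxv : max s (M / v) = hi := by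
        rw [hhidef]; exact max_eq_right (by omega)
      rw [hmaxv]
      -- split (lo, M] at hi
      rw [PySem.List.pyRange_one_append (lo + 1) (hi + 1) (M + 1) (by omega) (by omega),
          List.map_append, List.sum_append]
      -- on (lo, hi] the quotient M // x equals v
      have hconst : ∀ x, lo + 1 ≤ x → x < hi + 1 → M / x = v := by
        intro x hx1 hx2
        have hxpos : 0 < x := by omega
        have h1 : v ≤ M / x := by
          rw [Int.le_ediv_iff_mul_le hxpos]
          have := (Int.le_ediv_iff_mul_le hv0).mp (show x ≤ M / v by omega)
          linarith
        have h2 : M / x < v + 1 := by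
          rw [Int.ediv_lt_iff_lt_mul hxpos]
          have hlt : M < (M / (v + 1) + 1) * (v + 1) := Int.lt_ediv_add_one_mul_self M (by omega)
          have hxlo : M / (v + 1) + 1 ≤ x := by
            have : M / (v + 1) ≤ lo := le_max_right _ _
            omega
          nlinarith
        omega
      have hblocksum : ((PySem.List.pyRange (lo + 1) (hi + 1) 1).map (pvTermM M)).sum
          = (PySem.List.pyRange (lo + 1) (hi + 1) 1).sum * (v * (v + 1)) := by
        rw [show ((PySem.List.pyRange (lo + 1) (hi + 1) 1).map (pvTermM M))
              = (PySem.List.pyRange (lo + 1) (hi + 1) 1).map (fun x => x * (v * (v + 1))) from ?_]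
        · exact List.sum_map_mul_right _ id _ |>.trans (by rw [List.map_id])
        · apply List.map_congr_left
          intro x hx
          rw [PySem.List.mem_pyRange_one] at hx
          unfold pvTermM
          rw [hconst x hx.1 hx.2]; ring
      have hG : (PySem.List.pyRange (lo + 1) (hi + 1) 1).sum = hi * (hi + 1) / 2 - lo * (lo + 1) / 2 := by
        have := pv_gauss (hi + 1 - (lo + 1)).toNat (lo + 1) hi (by omega)
        rw [this]
        rw [show (lo + 1 - 1) * (lo + 1) = lo * (lo + 1) from by ring]
      have hgdiv : PySem.Int.floordiv (hi * (hi + 1) - lo * (lo + 1)) 2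
          = hi * (hi + 1) / 2 - lo * (lo + 1) / 2 := by
        rw [PySem.Int.floordiv_eq_ediv_of_pos (by omega)]
        have hp : hi * (hi + 1) % 2 = 0 := by
          have he := Int.even_mul_succ_self hi
          rwa [Int.even_iff] at he
        have hq : lo * (lo + 1) % 2 = 0 := by
          have he := Int.even_mul_succ_self lo
          rwa [Int.even_iff] at he
        omega
      rw [hgdiv, ← hG, hblocksum]
      ring
    · rw [if_neg hblk]
      -- empty block: the two max-cutoffs coincide
      have hmaxeq : max s (M / v) = max s (M / (v + 1)) := by
        rcases le_or_gt (M / v) s with hle | hgt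
        · rw [max_eq_left hle, max_eq_left (by omega)]
        · have : max s (M / (v + 1)) = M / (v + 1) := by
            have := not_lt.mp hblk
            rcases max_cases s (M / (v + 1)) with ⟨h1, _⟩ | ⟨h1, _⟩ <;> omega
          omega
      rw [hmaxeq]

-- ===== VERDICT (by name: the statement is the Claim_ definition above) =====
theorem calculate_T_even_N_spec : Claim_equal_calculate_T_even_N := by
  unfold Claim_equal_calculate_T_even_N Spec_calculate_T_even_N
  intro N _
  unfold calculate_T_even_N calculate_T_even_N_alt
  by_cases hN : N ≤ 1
  · -- both sides are 0
    rw [if_pos hN]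
    have hMle : PySem.Int.floordiv N 2 ≤ 0 := by
      have : PySem.Int.floordiv N 2 = N / 2 := PySem.Int.floordiv_eq_ediv_of_pos (by omega)
      omega
    simp only []
    rw [Int.toNat_of_nonpos hMle]
    rw [show altSqrtLoop (PySem.Int.floordiv N 2) (0 + 1) 0 1
          = if 1 * 1 ≤ PySem.Int.floordiv N 2 then
              altSqrtLoop (PySem.Int.floordiv N 2) 0
                (0 + 1 * PySem.Int.floordiv (PySem.Int.floordiv N 2) 1 *
                  (PySem.Int.floordiv (PySem.Int.floordiv N 2) 1 + 1)) (1 + 1)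
            else (0, 1) from rfl,
        if_neg (by omega)]
    rw [PySem.List.pyRange_one_eq_nil (by omega)]
    simp only [List.foldl_nil]
    decide
  · rw [if_neg hN]
    set M := PySem.Int.floordiv N 2 with hMdef
    have hM2 : M = N / 2 := by rw [hMdef, PySem.Int.floordiv_eq_ediv_of_pos (by omega)]
    have hM1 : 1 ≤ M := by omega
    -- the square root of M
    set s : Int := (Nat.sqrt M.toNat : Int) with hsdef
    have hMt : ((M.toNat : Nat) : Int) = M := by omega
    have hs1 : s * s ≤ M := by
      have h : ((Nat.sqrt M.toNat : Nat) : Int) * ((Nat.sqrt M.toNat : Nat) : Int)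
          ≤ ((M.toNat : Nat) : Int) := by exact_mod_cast Nat.sqrt_le M.toNat
      rw [hMt] at h
      rw [hsdef]
      exact h
    have hs2 : M < (s + 1) * (s + 1) := by
      have h := Nat.lt_succ_sqrt M.toNat
      zify at h
      rw [hMt] at h
      rw [hsdef]
      linarith
    have hs0 : 1 ≤ s := by
      have hnn : 0 ≤ s := by rw [hsdef]; positivity
      rcases le_or_gt 1 s with h | h
      · exact h
      · have hsz : s = 0 := by omega
        rw [hsz] at hs2
        omega
    have hsM : s ≤ M := by nlinarith
    -- evaluate B's two loops
    rw [pv_loopA N M (by omega) hMdef (N.toNat + 1) 0 1 (by omega) (by omega) (by omega) (by omega)]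
    simp only []
    rw [pv_sqrtLoop M s hs1 hs2 (M.toNat + 1) 0 1 (by omega) (by omega) (by omega)]
    simp only []
    rw [show (0 + ((PySem.List.pyRange 1 (s + 1) 1).map (pvTermM M)).sum, s + 1).2 - 1 = s from by simp]
    have hvl := pv_vLoop M s hs1 hs2 hs0 s.toNat
      ((0 + ((PySem.List.pyRange 1 (s + 1) 1).map (pvTermM M)).sum, s + 1).1)
      (by omega)
    rw [show ((s.toNat : Int)) = s from by omega] at hvl
    rw [hvl]
    -- the tail cutoff is exactly s
    have hcut : max s (M / (s + 1)) = s := by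
      have : M / (s + 1) < s + 1 := by
        rw [Int.ediv_lt_iff_lt_mul (by omega)]
        exact hs2
      rcases max_cases s (M / (s + 1)) with ⟨h1, _⟩ | ⟨h1, h2⟩
      · exact h1
      · omega
    rw [hcut]
    -- combine the two partial sums and translate pvTerm into pvTermM
    rw [PySem.Int.mod_eq_emod_of_pos (by omega)]
    have hsplit : ((PySem.List.pyRange 1 (M + 1) 1).map (pvTermM M)).sum
        = ((PySem.List.pyRange 1 (s + 1) 1).map (pvTermM M)).sum
          + ((PySem.List.pyRange (s + 1) (M + 1) 1).map (pvTermM M)).sum := by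
      rw [PySem.List.pyRange_one_append 1 (s + 1) (M + 1) (by omega) (by omega),
          List.map_append, List.sum_append]
    have hterms : ((PySem.List.pyRange 1 (M + 1) 1).map (pvTerm N)).sum
        = ((PySem.List.pyRange 1 (M + 1) 1).map (pvTermM M)).sum := by
      apply congrArg List.sum
      apply List.map_congr_left
      intro x hx
      rw [PySem.List.mem_pyRange_one] at hx
      unfold pvTerm pvTermM
      rw [PySem.Int.floordiv_eq_ediv_of_pos (by omega), hM2,
          Int.ediv_ediv_of_nonneg (by omega)]
    rw [hterms, hsplit]
    ring_nf
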